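-- pv_equiv track=rewrite | github.com/avariqfr30/InixindoUC3 | Payment predictor/report_generation.py | _extract_visual_markers
-- ===== SOURCE A (Python) =====
-- def _extract_visual_markers(visual_prompt):
--     chart_marker = ""
--     flow_marker = ""
--     for line in str(visual_prompt or "").splitlines():
--         stripped_line = line.strip()
--         if stripped_line.startswith("[[CHART:"):
--             chart_marker = stripped_line
--         elif stripped_line.startswith("[[FLOW:"):
--             flow_marker = stripped_line
--     return chart_marker, flow_marker
-- ===== SOURCE B (Python) =====
-- def _extract_visual_markers(visual_prompt):
--     lines = str(visual_prompt or "").splitlines()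
--     chart_marker = ""
--     flow_marker = ""
--     chart_found = False
--     flow_found = False
--     for line in reversed(lines):
--         s = line.strip()
--         if not chart_found and s.startswith("[[CHART:"):
--             chart_marker = s
--             chart_found = True
--         elif not flow_found and s.startswith("[[FLOW:"):
--             flow_marker = s
--             flow_found = True
--         if chart_found and flow_found:
--             break
--     return chart_marker, flow_marker
-- ===== Notes on version B (the rewrite author's own statement) =====
-- stated objective: alternative
-- what changed: Replaces the full forward pass that keeps overwriting the markers with a backward scan over reversed(splitlines()) that records the first (i.e. last-in-text) CHART and FLOW lines and breaks as soon as both are found.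
import Mathlib
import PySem

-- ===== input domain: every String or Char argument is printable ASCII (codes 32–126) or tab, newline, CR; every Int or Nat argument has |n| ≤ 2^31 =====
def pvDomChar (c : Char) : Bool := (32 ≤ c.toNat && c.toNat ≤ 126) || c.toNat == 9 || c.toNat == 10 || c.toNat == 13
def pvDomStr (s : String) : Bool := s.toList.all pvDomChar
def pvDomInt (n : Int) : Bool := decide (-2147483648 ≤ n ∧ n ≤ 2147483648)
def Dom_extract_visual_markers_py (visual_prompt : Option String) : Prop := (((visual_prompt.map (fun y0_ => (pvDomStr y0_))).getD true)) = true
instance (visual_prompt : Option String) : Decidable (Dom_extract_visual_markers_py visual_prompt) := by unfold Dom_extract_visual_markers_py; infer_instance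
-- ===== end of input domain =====

-- ===== PORT A =====
-- B changes the traversal: backward scan with found-flags and early break instead of A's full forward overwrite pass (objective: alternative).
def extract_visual_markers_py (visual_prompt : Option String) : String × String :=
  (PySem.Str.splitlines (visual_prompt.getD "")).foldl
    (fun st line =>
      let stripped_line := PySem.Str.strip line
      if PySem.Str.startswith stripped_line "[[CHART:" then (stripped_line, st.2)
      else if PySem.Str.startswith stripped_line "[[FLOW:" then (st.1, stripped_line)
      else st)
    ("", "")

-- ===== PORT B =====
-- backward scan (list is the reversed lines), with found flags and early termination once both are found
def pvScanBack : List String → String → String → Bool → Bool → String × String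
  | [], chart, flow, _, _ => (chart, flow)
  | line :: rest, chart, flow, cf, ff =>
    let s := PySem.Str.strip line
    if !cf && PySem.Str.startswith s "[[CHART:" then
      if ff then (s, flow) else pvScanBack rest s flow true ff
    else if !ff && PySem.Str.startswith s "[[FLOW:" then
      if cf then (chart, s) else pvScanBack rest chart s cf true
    else
      if cf && ff then (chart, flow) else pvScanBack rest chart flow cf ff

def extract_visual_markers_py_alt (visual_prompt : Option String) : String × String :=
  pvScanBack (PySem.Str.splitlines (visual_prompt.getD "")).reverse "" "" false false

-- ===== PRECONDITION & SPEC =====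
def Spec_extract_visual_markers_py (visual_prompt : Option String) (out : String × String) : Prop := out = extract_visual_markers_py_alt visual_prompt
instance (visual_prompt : Option String) (out : String × String) : Decidable (Spec_extract_visual_markers_py visual_prompt out) := by unfold Spec_extract_visual_markers_py; infer_instance

-- ===== CLAIM (what is proved, stated in full; the proofs are below) =====
def Claim_equal_extract_visual_markers_py : Prop := ∀ (visual_prompt : Option String), Dom_extract_visual_markers_py visual_prompt → Spec_extract_visual_markers_py visual_prompt (extract_visual_markers_py visual_prompt)

-- ===== LEMMAS AND PROOFS =====

-- first stripped line in the list starting with "[[CHART:" (default d)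
def pvFirstC : List String → String → String
  | [], d => d
  | x :: rest, d =>
    let s := PySem.Str.strip x
    if PySem.Str.startswith s "[[CHART:" then s else pvFirstC rest d

def pvFirstF : List String → String → String
  | [], d => d
  | x :: rest, d =>
    let s := PySem.Str.strip x
    if PySem.Str.startswith s "[[FLOW:" then s else pvFirstF rest d

theorem pv_not_both (s : String) (h : PySem.Str.startswith s "[[CHART:" = true) :
    PySem.Str.startswith s "[[FLOW:" = false := by
  by_contra hf
  rw [Bool.not_eq_false] at hf
  simp only [PySem.Str.startswith_eq, PySem.Chars.startswith_iff] at h hf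
  have := List.prefix_of_prefix_length_le hf h (by decide)
  revert this; decide

theorem pvScanBack_eq (R : List String) :
    ∀ (c f : String) (cf ff : Bool),
      pvScanBack R c f cf ff =
        ((if cf then c else pvFirstC R c), (if ff then f else pvFirstF R f)) := by
  induction R with
  | nil => intro c f cf ff; simp [pvScanBack, pvFirstC, pvFirstF]
  | cons x rest ih =>
    intro c f cf ff
    simp only [pvScanBack, pvFirstC, pvFirstF]
    by_cases hc : PySem.Str.startswith (PySem.Str.strip x) "[[CHART:" = true
    · have hf := pv_not_both _ hc
      simp at hc hf
      cases cf <;> cases ff <;> simp [hc, hf, ih]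
    · by_cases hf : PySem.Str.startswith (PySem.Str.strip x) "[[FLOW:" = true
      · simp at hc hf
        cases cf <;> cases ff <;> simp [hc, hf, ih]
      · simp at hc hf
        cases cf <;> cases ff <;> simp [hc, hf, ih]

theorem pvFirstC_append (R1 R2 : List String) (d : String) :
    pvFirstC (R1 ++ R2) d = pvFirstC R1 (pvFirstC R2 d) := by
  induction R1 with
  | nil => simp [pvFirstC]
  | cons x rest ih => simp only [List.cons_append, pvFirstC, ih]

theorem pvFirstF_append (R1 R2 : List String) (d : String) :
    pvFirstF (R1 ++ R2) d = pvFirstF R1 (pvFirstF R2 d) := by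
  induction R1 with
  | nil => simp [pvFirstF]
  | cons x rest ih => simp only [List.cons_append, pvFirstF, ih]

theorem pvFoldl_eq (L : List String) : ∀ (c f : String),
    L.foldl
      (fun st line =>
        let stripped_line := PySem.Str.strip line
        if PySem.Str.startswith stripped_line "[[CHART:" then (stripped_line, st.2)
        else if PySem.Str.startswith stripped_line "[[FLOW:" then (st.1, stripped_line)
        else st)
      (c, f) = (pvFirstC L.reverse c, pvFirstF L.reverse f) := by
  induction L with
  | nil => intro c f; simp [pvFirstC, pvFirstF]
  | cons x rest ih =>
    intro c f
    simp at ih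
    simp only [List.foldl_cons, List.reverse_cons, pvFirstC_append, pvFirstF_append]
    by_cases hc : PySem.Str.startswith (PySem.Str.strip x) "[[CHART:" = true
    · have hf := pv_not_both _ hc
      simp at hc hf
      simp [hc, hf, ih, pvFirstC, pvFirstF]
    · by_cases hf : PySem.Str.startswith (PySem.Str.strip x) "[[FLOW:" = true
      · simp at hc hf
        simp [hc, hf, ih, pvFirstC, pvFirstF]
      · simp at hc hf
        simp [hc, hf, ih, pvFirstC, pvFirstF]

-- ===== VERDICT (by name: the statement is the Claim_ definition above) =====
theorem extract_visual_markers_py_spec : Claim_equal_extract_visual_markers_py := by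
  intro visual_prompt _
  unfold Spec_extract_visual_markers_py extract_visual_markers_py extract_visual_markers_py_alt
  rw [pvFoldl_eq, pvScanBack_eq]
  simp
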